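-- pv_equiv track=rewrite | github.com/gimseonjin/leetcode | 프로그래머스/3/152995. 인사고과/인사고과.py | solution
-- ===== SOURCE A (Python) =====
-- def solution(scores):
--     wanho = scores[0]
--     wanho_sum = sum(wanho)
--
--     # 인센티브를 받을 수 있는 사원 목록 생성
--     eligible_scores = []
--
--     # 근무 태도 점수 기준 내림차순, 동료 평가 점수 기준 오름차순 정렬
--     scores.sort(key=lambda s: (-s[0], s[1]))
--
--     max_company = 0
--     for s in scores:
--         # 완호가 인센티브를 받을 수 없는 경우
--         if wanho[0] < s[0] and wanho[1] < s[1]: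
--             return -1
--
--         # 현재 사원이 인센티브를 받을 수 있는 경우
--         if max_company <= s[1]:
--             # 인센티브 자격 있는 사원의 점수와 완호 여부 저장
--             eligible_scores.append((s[0] + s[1], s == wanho))
--             max_company = s[1]
--
--     # 점수 합 기준 내림차순 정렬
--     eligible_scores.sort(key=lambda x: -x[0])
--
--     # 동석차를 고려한 순위 계산
--     rank = 1
--     i = 0
--
--     while i < len(eligible_scores):
--         current_score = eligible_scores[i][0]
--         same_rank_count = 0
--
--         # 동일 점수 사원 수 계산
--         while i + same_rank_count < len(eligible_scores) and eligible_scores[i + same_rank_count][0] == current_score: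
--             # 완호인 경우
--             if eligible_scores[i + same_rank_count][1]:
--                 return rank
--             same_rank_count += 1
--
--         # 다음 순위로 건너뛰기 (동석차 수만큼)
--         rank += same_rank_count
--         i += same_rank_count
--
--     # 여기까지 왔다면 오류 상황
--     return -1
-- ===== SOURCE B (Python) =====
-- def solution(scores):
--     # B: same in-place sort of scores, then one linear pass collecting eligible
--     # score-sums and a wanho-eligibility flag; rank = 1 + #(strictly greater sums).
--     # (No second sort, no group-scanning tie loop.)
--     wanho = scores[0]
--     scores.sort(key=lambda s: (-s[0], s[1]))
--     max_company = 0
--     sums = []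
--     wanho_ok = False
--     for s in scores:
--         if wanho[0] < s[0] and wanho[1] < s[1]:
--             return -1
--         if max_company <= s[1]:
--             sums.append(s[0] + s[1])
--             if s == wanho:
--                 wanho_ok = True
--             max_company = s[1]
--     if not wanho_ok:
--         return -1
--     w = wanho[0] + wanho[1]
--     return 1 + sum(1 for t in sums if t > w)
-- ===== Notes on version B (the rewrite author's own statement) =====
-- stated objective: simpler
-- what changed: B keeps A's first sort and eligibility pass but drops A's second sort and the two-level tie-group while-loop, computing the rank directly as 1 + the count of eligible score-sums strictly greater than Wanho's sum, with a boolean flag for Wanho's own eligibility.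
import Mathlib
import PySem

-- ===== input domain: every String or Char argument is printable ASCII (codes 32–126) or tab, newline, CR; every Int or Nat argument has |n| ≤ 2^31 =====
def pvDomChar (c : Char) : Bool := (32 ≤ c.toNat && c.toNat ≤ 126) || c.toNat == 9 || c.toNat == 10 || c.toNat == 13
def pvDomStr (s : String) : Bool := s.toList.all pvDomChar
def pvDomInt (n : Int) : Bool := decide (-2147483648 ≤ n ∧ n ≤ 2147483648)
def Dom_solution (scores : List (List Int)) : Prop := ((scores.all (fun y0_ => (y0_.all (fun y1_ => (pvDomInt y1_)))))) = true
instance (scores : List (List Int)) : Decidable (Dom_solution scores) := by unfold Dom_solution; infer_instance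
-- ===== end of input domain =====

-- B replaces A's second sort and group-wise tie-counting loop by a single
-- strictly-greater-sum count plus a wanho-eligibility flag (objective: simpler).
-- Both Pythons sort `scores` in place identically; equivalence is about the return value.

-- ===== PORT A =====
-- first loop of A: builds eligible (sum, is-wanho) list; none = the early `return -1`
def loopA (wanho : List Int) : List (List Int) → Int → List (Int × Bool) → Option (List (Int × Bool))
  | [], _, acc => some acc
  | s :: t, maxc, acc =>
    if wanho.getD 0 0 < s.getD 0 0 ∧ wanho.getD 1 0 < s.getD 1 0 then none
    else if maxc ≤ s.getD 1 0 then
      loopA wanho t (s.getD 1 0) (acc ++ [(s.getD 0 0 + s.getD 1 0, s == wanho)])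
    else loopA wanho t maxc acc

-- inner while of A: scans the rest of the current equal-score group;
-- none = wanho flag found (the `return rank`), some c = group had c more members
def innerA (cur : Int) : List (Int × Bool) → Option Nat
  | [] => some 0
  | (sc, w) :: t =>
    if sc = cur then (if w then none else (innerA cur t).map (· + 1))
    else some 0

-- outer while of A (the first inner iteration is the head pattern match)
def outerA : List (Int × Bool) → Int → Int
  | [], _ => -1
  | (sc, w) :: t, rank =>
    if w then rank
    else
      match innerA sc t with
      | none => rank
      | some c => outerA (t.drop c) (rank + 1 + (c : Int))
termination_by es _ => es.length
decreasing_by simp [List.length_drop]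

def solution (scores : List (List Int)) : Int :=
  let wanho := scores.getD 0 []
  let sorted := PySem.List.sorted2 scores (fun s => -(s.getD 0 0)) (fun s => s.getD 1 0)
  match loopA wanho sorted 0 [] with
  | none => -1
  | some es => outerA (PySem.List.sorted es (fun x => -x.1)) 1

-- ===== PORT B =====
-- B's single pass: eligible score-sums plus a wanho-eligibility flag
def loopB (wanho : List Int) : List (List Int) → Int → List Int → Bool → Option (List Int × Bool)
  | [], _, sums, ok => some (sums, ok)
  | s :: t, maxc, sums, ok =>
    if wanho.getD 0 0 < s.getD 0 0 ∧ wanho.getD 1 0 < s.getD 1 0 then none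
    else if maxc ≤ s.getD 1 0 then
      loopB wanho t (s.getD 1 0) (sums ++ [s.getD 0 0 + s.getD 1 0]) (ok || (s == wanho))
    else loopB wanho t maxc sums ok

def solution_alt (scores : List (List Int)) : Int :=
  let wanho := scores.getD 0 []
  let sorted := PySem.List.sorted2 scores (fun s => -(s.getD 0 0)) (fun s => s.getD 1 0)
  match loopB wanho sorted 0 [] false with
  | none => -1
  | some (sums, ok) =>
    if !ok then -1
    else 1 + ((sums.filter (fun t => wanho.getD 0 0 + wanho.getD 1 0 < t)).length : Int)

-- ===== PRECONDITION & SPEC =====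
-- Pre_ excludes exactly the inputs where Python A raises IndexError:
-- scores[0] on an empty list, or s[0]/s[1] on an element with fewer than 2 entries.
def Pre_solution (scores : List (List Int)) : Prop :=
  scores ≠ [] ∧ ∀ s ∈ scores, 2 ≤ s.length
instance (scores : List (List Int)) : Decidable (Pre_solution scores) := by
  unfold Pre_solution; infer_instance

def pvWitness_solution : List (List Int) := [[2, 2], [3, 1], [1, 4]]

def Spec_solution (scores : List (List Int)) (out : Int) : Prop := out = solution_alt scores
instance (scores : List (List Int)) (out : Int) : Decidable (Spec_solution scores out) := by
  unfold Spec_solution; infer_instance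

-- ===== CLAIM (what is proved, stated in full; the proofs are below) =====
def Claim_equal_solution : Prop := ∀ (scores : List (List Int)), Dom_solution scores → Pre_solution scores → Spec_solution scores (solution scores)

-- ===== LEMMAS AND PROOFS =====

theorem loopB_eq_loopA (w : List Int) (l : List (List Int)) (maxc : Int) (acc : List (Int × Bool)) :
    loopB w l maxc (acc.map Prod.fst) (acc.any Prod.snd)
      = (loopA w l maxc acc).map (fun es => (es.map Prod.fst, es.any Prod.snd)) := by
  induction l generalizing maxc acc with
  | nil => simp [loopA, loopB]
  | cons s t ih =>
    simp only [loopA, loopB]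
    split_ifs with h1 h2
    · rfl
    · simpa using ih (s.getD 1 0) (acc ++ [(s.getD 0 0 + s.getD 1 0, s == w)])
    · exact ih maxc acc

theorem loopA_flag (w : List Int) (l : List (List Int)) (maxc : Int) (acc : List (Int × Bool))
    (hacc : ∀ e ∈ acc, e.2 = true → e.1 = w.getD 0 0 + w.getD 1 0)
    {es : List (Int × Bool)} (h : loopA w l maxc acc = some es) :
    ∀ e ∈ es, e.2 = true → e.1 = w.getD 0 0 + w.getD 1 0 := by
  induction l generalizing maxc acc with
  | nil => simp only [loopA, Option.some.injEq] at h; subst h; exact hacc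
  | cons s t ih =>
    by_cases h1 : (w.getD 0 0 < s.getD 0 0 ∧ w.getD 1 0 < s.getD 1 0)
    · rw [loopA, if_pos h1] at h; cases h
    · by_cases h2 : maxc ≤ s.getD 1 0
      · rw [loopA, if_neg h1, if_pos h2] at h
        refine ih _ _ ?_ h
        intro e he hf
        rcases List.mem_append.1 he with he | he
        · exact hacc e he hf
        · simp only [List.mem_singleton] at he
          subst he
          simp only at hf
          have hsw : s = w := (beq_iff_eq).1 hf
          simp [hsw]
      · rw [loopA, if_neg h1, if_neg h2] at h
        exact ih _ _ hacc h

theorem innerA_none {cur : Int} {l : List (Int × Bool)} (h : innerA cur l = none) :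
    ∃ e ∈ l, e.1 = cur ∧ e.2 = true := by
  induction l with
  | nil => simp [innerA] at h
  | cons x t ih =>
    obtain ⟨sc, w⟩ := x
    by_cases h1 : sc = cur
    · by_cases h2 : w = true
      · exact ⟨(sc, w), List.mem_cons_self .., h1, h2⟩
      · rw [innerA, if_pos h1, if_neg h2] at h
        obtain ⟨e, he, hp⟩ := ih (Option.map_eq_none_iff.1 h)
        exact ⟨e, List.mem_cons_of_mem _ he, hp⟩
    · rw [innerA, if_neg h1] at h; cases h

theorem innerA_some {cur : Int} {l : List (Int × Bool)} {c : Nat} (h : innerA cur l = some c) :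
    c ≤ l.length ∧ (∀ e ∈ l.take c, e.1 = cur ∧ e.2 = false) ∧
      (l.drop c = [] ∨ ∃ d r, l.drop c = d :: r ∧ d.1 ≠ cur) := by
  induction l generalizing c with
  | nil =>
    simp only [innerA, Option.some.injEq] at h; subst h; simp
  | cons x t ih =>
    obtain ⟨sc, w⟩ := x
    by_cases h1 : sc = cur
    · by_cases h2 : w = true
      · rw [innerA, if_pos h1, if_pos h2] at h; cases h
      · rw [innerA, if_pos h1, if_neg h2] at h
        obtain ⟨c', hc', hcc⟩ := Option.map_eq_some_iff.1 h
        have hcc' : c = c' + 1 := by simpa using hcc.symm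
        subst hcc'
        obtain ⟨hlen, htake, hdrop⟩ := ih hc'
        refine ⟨by simp; omega, ?_, by simpa using hdrop⟩
        intro e he
        rcases List.mem_cons.1 (by simpa [List.take_succ_cons] using he) with he | he
        · subst he; exact ⟨h1, by simpa using h2⟩
        · exact htake e he
    · rw [innerA, if_neg h1] at h
      obtain rfl : (0 : Nat) = c := Option.some.inj h
      exact ⟨by simp, by simp, Or.inr ⟨(sc, w), t, rfl, h1⟩⟩

theorem outerA_eq (W : Int) (es : List (Int × Bool)) (rank : Int) :
    es.Pairwise (fun a b => b.1 ≤ a.1) →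
    (∀ e ∈ es, e.2 = true → e.1 = W) →
    outerA es rank =
      if es.any Prod.snd then rank + ((es.filter (fun e => decide (W < e.1))).length : Int) else -1 := by
  induction es, rank using outerA.induct with
  | case1 rank => intro _ _; simp [outerA]
  | case2 sc t rank =>
    intro hpair hflag
    have hW : sc = W := hflag (sc, true) (List.mem_cons_self ..) rfl
    have hfilt : ∀ e ∈ (sc, true) :: t, ¬ (W < e.1) := by
      intro e he
      rcases List.mem_cons.1 he with rfl | he
      · omega
      · have := (List.pairwise_cons.1 hpair).1 e he
        simp only at this; omega
    have hnil : List.filter (fun e => decide (W < e.1)) ((sc, true) :: t) = [] := by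
      rw [List.filter_eq_nil_iff]
      intro e he; simpa using hfilt e he
    simp [outerA, hnil, List.any_cons]
  | case3 sc w t rank hw hin =>
    rw [Bool.not_eq_true] at hw; subst hw
    intro hpair hflag
    obtain ⟨e, he, hec, hef⟩ := innerA_none hin
    have hW : sc = W := by
      have := hflag e (List.mem_cons_of_mem _ he) hef; omega
    have hany : ((sc, false) :: t).any Prod.snd = true := by
      simp only [List.any_eq_true]
      exact ⟨e, List.mem_cons_of_mem _ he, hef⟩
    have hfilt : List.filter (fun e => decide (W < e.1)) ((sc, false) :: t) = [] := by
      rw [List.filter_eq_nil_iff]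
      intro x hx
      rcases List.mem_cons.1 hx with rfl | hx
      · simp; omega
      · have := (List.pairwise_cons.1 hpair).1 x hx
        simp only at this; simp; omega
    simp [outerA, hin, hany, hfilt]
  | case4 sc w t rank hw c hin ih =>
    rw [Bool.not_eq_true] at hw; subst hw
    intro hpair hflag
    obtain ⟨hlen, htake, hdrop⟩ := innerA_some hin
    have ht : t.Pairwise (fun a b => b.1 ≤ a.1) := (List.pairwise_cons.1 hpair).2
    have hdp : (t.drop c).Pairwise (fun a b => b.1 ≤ a.1) :=
      List.Pairwise.sublist (List.drop_sublist c t) ht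
    have hmem : ∀ e ∈ t.drop c, e ∈ (sc, false) :: t := fun e he =>
      List.mem_cons_of_mem _ ((List.drop_subset c t) he)
    have ihv := ih hdp (fun e he => hflag e (hmem e he))
    have hsplit : t = t.take c ++ t.drop c := (List.take_append_drop c t).symm
    have hanyt : ((sc, false) :: t).any Prod.snd = (t.drop c).any Prod.snd := by
      conv_lhs => rw [hsplit]
      simp only [List.any_cons, List.any_append]
      have : (t.take c).any Prod.snd = false := by
        simp only [List.any_eq_false]
        intro e he; simp [(htake e he).2]
      simp [this]
    rw [outerA]
    simp only [Bool.false_eq_true, if_false, hin]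
    rw [ihv, hanyt]
    cases hca : (t.drop c).any Prod.snd with
    | false => simp
    | true =>
      -- some flagged entry lies in the drop; its score is W and W < sc
      obtain ⟨e, he, hef⟩ := List.any_eq_true.1 hca
      have heW : e.1 = W := hflag e (hmem e he) hef
      rcases hdrop with hnil | ⟨d, r, hdr, hd⟩
      · rw [hnil] at he; cases he
      · have hdle : d.1 ≤ sc := by
          have hdm : d ∈ t := (List.drop_subset c t) (hdr ▸ List.mem_cons_self ..)
          have := (List.pairwise_cons.1 hpair).1 d hdm
          simpa using this
        have hed : e.1 ≤ d.1 := by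
          rw [hdr] at he hdp
          rcases List.mem_cons.1 he with rfl | he
          · exact le_refl _
          · exact (List.pairwise_cons.1 hdp).1 e he
        have hWsc : W < sc := by
          rcases lt_or_eq_of_le hdle with hlt | heq
          · omega
          · exact absurd heq hd
        -- filter over the whole list = (1 + c) entries of score sc, plus filter over the drop
        have hfsc : ∀ e ∈ (sc, false) :: t.take c, decide (W < e.1) = true := by
          intro x hx
          rcases List.mem_cons.1 hx with rfl | hx
          · simp; omega
          · simp [(htake x hx).1]; omega
        have hfall : List.filter (fun e => decide (W < e.1)) ((sc, false) :: t)
            = ((sc, false) :: t.take c) ++ List.filter (fun e => decide (W < e.1)) (t.drop c) := by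
          conv_lhs => rw [hsplit]
          rw [show ((sc, false) :: (t.take c ++ t.drop c)) = ((sc, false) :: t.take c) ++ t.drop c by simp]
          rw [List.filter_append, List.filter_eq_self.2 hfsc]
        have hclen : (t.take c).length = c := List.length_take_of_le hlen
        rw [if_pos rfl, if_pos rfl, hfall]
        simp only [List.length_append, List.length_cons, hclen]
        push_cast
        ring

theorem perm_any {α : Type} {l₁ l₂ : List α} (h : l₁.Perm l₂) (p : α → Bool) :
    l₁.any p = l₂.any p := by
  cases hh : l₂.any p with
  | false =>
    simp only [List.any_eq_false] at hh ⊢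
    intro x hx; exact hh x (h.mem_iff.1 hx)
  | true =>
    simp only [List.any_eq_true] at hh ⊢
    obtain ⟨x, hx, hpx⟩ := hh
    exact ⟨x, h.mem_iff.2 hx, hpx⟩

theorem solution_spec : Claim_equal_solution := by
  unfold Claim_equal_solution
  intro scores _ _
  unfold Spec_solution solution solution_alt
  simp only []
  set w := scores.getD 0 [] with hw
  set l := PySem.List.sorted2 scores (fun s => -(s.getD 0 0)) (fun s => s.getD 1 0) with hl
  have hB := loopB_eq_loopA w l 0 []
  simp only [List.map_nil, List.any_nil] at hB
  cases hA : loopA w l 0 [] with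
  | none => rw [hA] at hB; rw [hB]; rfl
  | some es =>
    rw [hA] at hB
    simp only [Option.map_some] at hB
    rw [hB]
    have hflag : ∀ e ∈ es, e.2 = true → e.1 = w.getD 0 0 + w.getD 1 0 :=
      loopA_flag w l 0 [] (by simp) hA
    set W := w.getD 0 0 + w.getD 1 0 with hWdef
    set ses := PySem.List.sorted es (fun x => -x.1) with hses
    have hperm : ses.Perm es := PySem.List.sorted_perm ..
    have hpair : ses.Pairwise (fun a b => b.1 ≤ a.1) := by
      have := PySem.List.sorted_pairwise (xs := es) (key := fun x => -x.1)
      exact this.imp (fun h => by omega)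
    have hout := outerA_eq W ses 1 hpair (fun e he => hflag e (hperm.mem_iff.1 he))
    show outerA ses 1 =
      if (!(es.any Prod.snd)) = true then -1
      else 1 + (((es.map Prod.fst).filter (fun t => decide (W < t))).length : Int)
    rw [hout, perm_any hperm Prod.snd]
    have hflen : (ses.filter (fun e => decide (W < e.1))).length
        = ((es.map Prod.fst).filter (fun t => decide (W < t))).length := by
      rw [(hperm.filter _).length_eq, List.filter_map, List.length_map]
      rfl
    rw [hflen]
    cases hok : es.any Prod.snd with
    | false => simp
    | true => simp
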